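-- pv_equiv track=rewrite | github.com/jessepye/advent-of-code-2024 | 9b/solver.py | findOpening
-- ===== SOURCE A (Python) =====
-- def findOpening(blocks, size):
--     currentSize = 0
--     for i in range(len(blocks)):
--         if blocks[i] == None:
--             currentSize += 1
--             if currentSize >= size:
--                 return i - currentSize + 1
--         else:
--             currentSize = 0
--     return None
-- ===== SOURCE B (Python) =====
-- def findOpening(blocks, size):
--     n = len(blocks)
--     i = 0
--     while i < n:
--         j = i + 1
--         while j < n and (blocks[j] is None) == (blocks[i] is None):
--             j += 1
--         if blocks[i] is None and j - i >= size:
--             return i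
--         i = j
--     return None
-- ===== Notes on version B (the rewrite author's own statement) =====
-- stated objective: alternative
-- what changed: B replaces A's element-wise running-counter pass with a run-grouping two-pointer scan: an inner pointer measures each maximal run of equal None-ness at once and whole None-runs are tested against size.
import Mathlib
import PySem

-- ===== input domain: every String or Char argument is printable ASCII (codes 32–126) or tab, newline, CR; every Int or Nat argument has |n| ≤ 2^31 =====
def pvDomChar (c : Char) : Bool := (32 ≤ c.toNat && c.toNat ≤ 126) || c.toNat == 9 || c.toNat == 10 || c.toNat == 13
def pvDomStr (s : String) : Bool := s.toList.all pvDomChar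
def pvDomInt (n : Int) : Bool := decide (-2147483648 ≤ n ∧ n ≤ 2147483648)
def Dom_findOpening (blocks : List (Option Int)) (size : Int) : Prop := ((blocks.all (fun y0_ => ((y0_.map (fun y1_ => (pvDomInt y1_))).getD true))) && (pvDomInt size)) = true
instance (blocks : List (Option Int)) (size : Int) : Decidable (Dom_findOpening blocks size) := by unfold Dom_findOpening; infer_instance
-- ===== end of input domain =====

-- B is an alternative O(n) algorithm: a run-grouping two-pointer scan instead of A's
-- element-wise running counter; same return value everywhere (both total).

-- ===== PORT A =====
-- A's for-loop over indices with the running counter `currentSize`.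
def goA (size : Int) : List (Option Int) → Int → Int → Option Int
  | [], _, _ => none
  | b :: bs, i, currentSize =>
    if b = none then
      if size ≤ currentSize + 1 then some (i - (currentSize + 1) + 1)
      else goA size bs (i + 1) (currentSize + 1)
    else goA size bs (i + 1) 0

def findOpening (blocks : List (Option Int)) (size : Int) : Option Int :=
  goA size blocks 0 0

-- ===== PORT B =====
-- B's index two-pointer loop is rendered over list suffixes: position i becomes the
-- suffix 'x :: xs' together with the running offset 'start'; 'i := j' becomes dropping
-- the measured run. Exact on every input.
-- inner while loop of B (j scanning past matching elements): length of the matching prefix of the tail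
def runMatch (p : Option Int → Bool) : List (Option Int) → Nat
  | [] => 0
  | y :: ys => if p y then runMatch p ys + 1 else 0

def goB (size : Int) : List (Option Int) → Int → Option Int
  | [], _ => none
  | x :: xs, start =>
    let run : Nat := runMatch (fun y => y.isNone == x.isNone) xs + 1
    if x.isNone = true ∧ size ≤ (run : Int) then some start
    else goB size (xs.drop (run - 1)) (start + (run : Int))
termination_by l _ => l.length
decreasing_by simp

def findOpening_alt (blocks : List (Option Int)) (size : Int) : Option Int :=
  goB size blocks 0

-- ===== PRECONDITION & SPEC =====
def Spec_findOpening (blocks : List (Option Int)) (size : Int) (out : Option Int) : Prop := out = findOpening_alt blocks size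
instance (blocks : List (Option Int)) (size : Int) (out : Option Int) : Decidable (Spec_findOpening blocks size out) := by unfold Spec_findOpening; infer_instance

-- ===== CLAIM (what is proved, stated in full; the proofs are below) =====
def Claim_equal_findOpening : Prop := ∀ (blocks : List (Option Int)) (size : Int), Dom_findOpening blocks size → Spec_findOpening blocks size (findOpening blocks size)

-- ===== LEMMAS AND PROOFS =====

lemma goB_nil (size start : Int) : goB size [] start = none := by
  unfold goB
  rfl

lemma goB_cons (size : Int) (x : Option Int) (xs : List (Option Int)) (start : Int) :
    goB size (x :: xs) start =
      (if x.isNone = true ∧ size ≤ ((runMatch (fun y => y.isNone == x.isNone) xs + 1 : Nat) : Int)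
       then some start
       else goB size (xs.drop (runMatch (fun y => y.isNone == x.isNone) xs))
              (start + ((runMatch (fun y => y.isNone == x.isNone) xs + 1 : Nat) : Int))) := by
  conv_lhs => unfold goB
  simp only [Nat.add_sub_cancel]

-- A over a run of k Nones: returns i - cur if the counter reaches size inside the run.
lemma goA_none (size : Int) : ∀ (k : Nat) (rest : List (Option Int)) (i cur : Int),
    goA size (List.replicate k none ++ rest) i cur =
      if 1 ≤ k ∧ size ≤ cur + (k : Int) then some (i - cur)
      else goA size rest (i + (k : Int)) (cur + (k : Int)) := by
  intro k
  induction k with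
  | zero => intro rest i cur; simp
  | succ k ih =>
    intro rest i cur
    have hstep : List.replicate (k + 1) (none : Option Int) ++ rest
        = none :: (List.replicate k none ++ rest) := by
      simp [List.replicate_succ]
    rw [hstep]
    simp only [goA, reduceIte]
    by_cases h1 : size ≤ cur + 1
    · rw [if_pos h1, if_pos (by omega)]
      congr 1; omega
    · rw [if_neg h1, ih]
      by_cases h2 : size ≤ cur + 1 + (k : Int)
      · rw [if_pos (show (1:Nat) ≤ k ∧ size ≤ cur + 1 + (k:Int) by omega),
            if_pos (by omega)]
        congr 1; omega
      · rw [if_neg (by omega), if_neg (by omega)]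
        congr 1 <;> push_cast <;> omega

-- A over a run of non-None elements: counter resets, positions advance.
lemma goA_some (size : Int) : ∀ (ys : List (Option Int)), (∀ z ∈ ys, z ≠ none) →
    ∀ (rest : List (Option Int)) (i : Int),
    goA size (ys ++ rest) i 0 = goA size rest (i + (ys.length : Int)) 0 := by
  intro ys
  induction ys with
  | nil => intro _ rest i; simp
  | cons y ys ih =>
    intro h rest i
    have hy : y ≠ none := h y (by simp)
    simp only [List.cons_append, goA, if_neg hy]
    rw [ih (fun z hz => h z (by simp [hz])) rest (i + 1)]
    congr 1
    simp only [List.length_cons]; push_cast; omega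

-- the counter is irrelevant when the list is empty or starts with a non-None element
lemma goA_cur_irrel (size : Int) (rest : List (Option Int)) (i cur : Int)
    (h : rest = [] ∨ ∃ y t, rest = y :: t ∧ y ≠ none) :
    goA size rest i cur = goA size rest i 0 := by
  rcases h with h | ⟨y, t, rfl, hy⟩
  · subst h; rfl
  · simp [goA, if_neg hy]

lemma runMatch_eq (p : Option Int → Bool) : ∀ l : List (Option Int),
    runMatch p l = (l.takeWhile p).length := by
  intro l
  induction l with
  | nil => rfl
  | cons y ys ih =>
    simp only [runMatch, List.takeWhile]
    by_cases h : p y = true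
    · simp [h, ih]
    · simp [h]

lemma drop_runMatch (p : Option Int → Bool) : ∀ l : List (Option Int),
    l.drop (runMatch p l) = l.dropWhile p := by
  intro l
  induction l with
  | nil => rfl
  | cons y ys ih =>
    by_cases h : p y = true
    · simp [runMatch, h, List.dropWhile_cons_of_pos h, ih]
    · rw [List.dropWhile_cons_of_neg (by simpa using h)]
      simp [runMatch, h]

lemma dropWhile_head_false (p : Option Int → Bool) : ∀ (l : List (Option Int)) (y : Option Int) (t : List (Option Int)),
    l.dropWhile p = y :: t → p y = false := by
  intro l
  induction l with
  | nil => intro y t h; simp at h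
  | cons z zs ih =>
    intro y t h
    by_cases hz : p z = true
    · rw [List.dropWhile_cons_of_pos hz] at h; exact ih y t h
    · rw [List.dropWhile_cons_of_neg (by simp [hz])] at h
      cases h; simpa using hz

-- main equivalence, by strong induction on the list length, run by run
lemma main_lemma (size : Int) : ∀ (n : Nat) (l : List (Option Int)), l.length ≤ n →
    ∀ i : Int, goA size l i 0 = goB size l i := by
  intro n
  induction n with
  | zero =>
    intro l hl i
    have : l = [] := List.eq_nil_of_length_eq_zero (by omega)
    subst this; rw [goB_nil]; rfl
  | succ n ih =>
    intro l hl i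
    cases l with
    | nil => rw [goB_nil]; rfl
    | cons x xs =>
      set p : Option Int → Bool := fun y => y.isNone == x.isNone with hp
      have hrest : xs.drop (runMatch p xs) = xs.dropWhile p := drop_runMatch p xs
      have hk : runMatch p xs = (xs.takeWhile p).length := runMatch_eq p xs
      have hrestlen : (xs.dropWhile p).length ≤ n := by
        have := List.length_dropWhile_le p xs
        simp at hl; omega
      rw [goB_cons, ← hp, hrest, hk]
      have hhead : xs.dropWhile p = [] ∨ ∃ y t, xs.dropWhile p = y :: t ∧ (p y = false) := by
        cases hde : xs.dropWhile p with
        | nil => exact Or.inl rfl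
        | cons y t => exact Or.inr ⟨y, t, rfl, dropWhile_head_false p _ y t hde⟩
      cases x with
      | none =>
        have hall : ∀ z ∈ xs.takeWhile p, z = none := by
          intro z hz
          have := List.mem_takeWhile_imp hz
          simp [hp] at this
          exact this
        have hrepl : xs.takeWhile p = List.replicate (xs.takeWhile p).length none :=
          List.eq_replicate_of_mem hall
        have hsplit : (none : Option Int) :: xs
            = List.replicate ((xs.takeWhile p).length + 1) none ++ xs.dropWhile p := by
          rw [List.replicate_succ, List.cons_append]
          congr 1
          conv_lhs => rw [← List.takeWhile_append_dropWhile (p := p) (l := xs), hrepl]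
        conv_lhs => rw [hsplit]
        rw [goA_none]
        by_cases hc : size ≤ ((((xs.takeWhile p).length + 1 : Nat)) : Int)
        · rw [if_pos (show 1 ≤ (xs.takeWhile p).length + 1 ∧ size ≤ (0:Int) + (((xs.takeWhile p).length + 1 : Nat) : Int) by omega),
              if_pos ⟨rfl, hc⟩]
          congr 1; omega
        · rw [if_neg (by push_cast; push_cast at hc; omega),
              if_neg (by intro hcc; exact hc hcc.2)]
          have hh2 : xs.dropWhile p = [] ∨ ∃ y t, xs.dropWhile p = y :: t ∧ y ≠ none := by
            rcases hhead with h | ⟨y, t, he, hf⟩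
            · exact Or.inl h
            · refine Or.inr ⟨y, t, he, ?_⟩
              intro hn; subst hn; simp [hp] at hf
          rw [goA_cur_irrel size _ _ _ hh2, ih _ hrestlen]
      | some v =>
        have hall : ∀ z ∈ (some v : Option Int) :: xs.takeWhile p, z ≠ none := by
          intro z hz
          rcases List.mem_cons.mp hz with h | h
          · subst h; simp
          · have := List.mem_takeWhile_imp h
            simp [hp] at this
            intro he; subst he; simp at this
        have hsplit : (some v : Option Int) :: xs
            = ((some v : Option Int) :: xs.takeWhile p) ++ xs.dropWhile p := by
          simp [List.takeWhile_append_dropWhile]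
        conv_lhs => rw [hsplit]
        rw [goA_some size _ hall, if_neg (by simp), ih _ hrestlen]
        congr 1

-- ===== VERDICT (by name: the statement is the Claim_ definition above) =====
theorem findOpening_spec : Claim_equal_findOpening := by
  intro blocks size _
  unfold Spec_findOpening findOpening findOpening_alt
  exact main_lemma size blocks.length blocks le_rfl 0
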